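-- pv_equiv track=rewrite | github.com/marialauramarqui/Ideia-vesti | relatoriostarkbank/fetch_invoices.py | parse_purchase_tags
-- ===== SOURCE A (Python) =====
-- def parse_purchase_tags(tags: list[str]) -> dict:
--     """Extrai companyId / orderId / customerId dos tags."""
--     out: dict = {}
--     for t in tags or []:
--         if t.startswith("company_"):
--             out["companyId"] = t[len("company_"):]
--         elif t.startswith("order_"):
--             out["orderId"] = t[len("order_"):]
--         elif t.startswith("customer_"):
--             out["customerId"] = t[len("customer_"):]
--     return out
-- ===== SOURCE B (Python) =====
-- _TABLE = {"company": "companyId", "order": "orderId", "customer": "customerId"}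
--
--
-- def parse_purchase_tags(tags: list[str]) -> dict:
--     """Extrai companyId / orderId / customerId dos tags."""
--     out: dict = {}
--     for t in tags or []:
--         prefix, sep, rest = t.partition("_")
--         if sep and prefix in _TABLE:
--             out[_TABLE[prefix]] = rest
--     return out
-- ===== Notes on version B (the rewrite author's own statement) =====
-- stated objective: idiomatic
-- what changed: Replaces the ordered startswith/slice branch chain by splitting each tag once at its first underscore and looking the bare prefix up in a fixed prefix-to-key table.
import Mathlib
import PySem

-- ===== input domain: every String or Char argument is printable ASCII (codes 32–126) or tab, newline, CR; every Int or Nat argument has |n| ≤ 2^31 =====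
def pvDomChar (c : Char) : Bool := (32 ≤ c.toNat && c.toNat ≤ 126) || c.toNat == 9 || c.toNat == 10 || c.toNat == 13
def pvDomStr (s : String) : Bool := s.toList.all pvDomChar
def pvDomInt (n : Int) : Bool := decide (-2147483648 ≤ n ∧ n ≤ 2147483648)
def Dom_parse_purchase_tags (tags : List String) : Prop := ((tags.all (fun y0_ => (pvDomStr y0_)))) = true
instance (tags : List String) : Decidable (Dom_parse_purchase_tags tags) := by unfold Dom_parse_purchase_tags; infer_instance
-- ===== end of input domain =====

-- B replaces A's ordered startswith/slice branch chain by one split at the first underscore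
-- plus a fixed prefix→key table lookup (objective: idiomatic; same behaviour, proved equal).

-- ===== PORT A =====
-- the body of A's for-loop (the three ordered startswith branches)
def pvStepA (out : PySem.Dict String String) (t : String) : PySem.Dict String String :=
  if PySem.Str.startswith t "company_" then out.insert "companyId" (PySem.Str.slice t (some 8) none)
  else if PySem.Str.startswith t "order_" then out.insert "orderId" (PySem.Str.slice t (some 6) none)
  else if PySem.Str.startswith t "customer_" then out.insert "customerId" (PySem.Str.slice t (some 9) none)
  else out

def parse_purchase_tags (tags : List String) : List (String × String) :=
  (tags.foldl pvStepA PySem.Dict.empty).items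

-- ===== PORT B =====
-- Source B's module-level table _TABLE
def pvTable : PySem.Dict String String :=
  PySem.Dict.ofList [("company", "companyId"), ("order", "orderId"), ("customer", "customerId")]

-- hand port of Python's t.partition("_") for the one-char separator "_": exact — it splits at
-- the FIRST '_' and reports (prefix, whether a separator was found, rest)
def pvPartitionU (cs : List Char) : List Char × Bool × List Char :=
  match cs with
  | [] => ([], false, [])
  | c :: rest =>
    if c = '_' then ([], true, rest)
    else
      let (p, f, r) := pvPartitionU rest
      (c :: p, f, r)

-- the body of Source B's for-loop (partition, then table lookup; 'prefix in _TABLE' + indexing = get?)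
def pvStepB (out : PySem.Dict String String) (t : String) : PySem.Dict String String :=
  match pvPartitionU t.toList with
  | (pre, found, rest) =>
    if found then
      match pvTable.get? (String.ofList pre) with
      | some k => out.insert k (String.ofList rest)
      | none => out
    else out

def parse_purchase_tags_alt (tags : List String) : List (String × String) :=
  (tags.foldl pvStepB PySem.Dict.empty).items

-- ===== PRECONDITION & SPEC =====
def Spec_parse_purchase_tags (tags : List String) (out : List (String × String)) : Prop := out = parse_purchase_tags_alt tags
instance (tags : List String) (out : List (String × String)) : Decidable (Spec_parse_purchase_tags tags out) := by unfold Spec_parse_purchase_tags; infer_instance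

-- ===== CLAIM (what is proved, stated in full; the proofs are below) =====
def Claim_equal_parse_purchase_tags : Prop := ∀ (tags : List String), Dom_parse_purchase_tags tags → Spec_parse_purchase_tags tags (parse_purchase_tags tags)

-- ===== LEMMAS AND PROOFS =====

-- partition of p ++ '_' :: r with no '_' in p splits exactly there
theorem pvPartitionU_prefix (p r : List Char) (h : '_' ∉ p) :
    pvPartitionU (p ++ '_' :: r) = (p, true, r) := by
  induction p with
  | nil => simp [pvPartitionU]
  | cons c p ih =>
    have hc : c ≠ '_' := fun hc => h (by simp [hc])
    have ih' := ih (fun hm => h (List.mem_cons_of_mem _ hm))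
    simp [pvPartitionU, hc, ih']

-- a found partition decomposes the input at a first '_'
theorem pvPartitionU_found (cs p r : List Char) (h : pvPartitionU cs = (p, true, r)) :
    cs = p ++ '_' :: r ∧ '_' ∉ p := by
  induction cs generalizing p r with
  | nil => simp [pvPartitionU] at h
  | cons c rest ih =>
    by_cases hc : c = '_'
    · simp only [pvPartitionU, if_pos hc, Prod.mk.injEq] at h
      obtain ⟨h1, _, h3⟩ := h
      subst hc
      simp [← h1, h3]
    · rcases hq : pvPartitionU rest with ⟨p', f', r'⟩
      simp only [pvPartitionU, if_neg hc, hq, Prod.mk.injEq] at h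
      obtain ⟨h1, h2, h3⟩ := h
      subst h2; subst h3
      obtain ⟨ha, hb⟩ := ih p' r' hq
      refine ⟨by rw [← h1, ha]; simp, ?_⟩
      rw [← h1]
      intro hm
      rcases List.mem_cons.mp hm with h' | h'
      · exact hc h'.symm
      · exact hb h'

-- startswith in terms of the char-list prefix relation
theorem pv_startswith_iff (s t : String) :
    PySem.Str.startswith s t = true ↔ t.toList <+: s.toList := by
  simp [PySem.Chars.startswith_iff]

-- the table lookup, in closed form
theorem pv_tbl_get (s : String) : pvTable.get? s =
    if "company" = s then some "companyId"
    else if "order" = s then some "orderId"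
    else if "customer" = s then some "customerId" else none := by
  have h : pvTable = PySem.Dict.mk
      [("company", "companyId"), ("order", "orderId"), ("customer", "customerId")] := by decide
  rw [h]
  simp only [PySem.Dict.get?_mk_cons, beq_iff_eq]
  split_ifs <;> simp [PySem.Dict.get?]

-- if t starts with q ++ "_" (no '_' in q), the partition finds exactly q
theorem pv_start_found (t pre : String) (q : List Char)
    (hpre : pre.toList = q ++ ['_']) (hq2 : '_' ∉ q)
    (h : PySem.Str.startswith t pre = true) :
    ∃ r, pvPartitionU t.toList = (q, true, r) := by
  obtain ⟨r, hr⟩ := (pv_startswith_iff t pre).mp h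
  refine ⟨r, ?_⟩
  rw [← hr, hpre, List.append_assoc, List.singleton_append]
  exact pvPartitionU_prefix q r hq2

-- if the partition of t found prefix p and p is not q, t does not start with q ++ "_"
theorem pv_not_start (t : String) (pre : String) (q p : List Char) (f : Bool) (r : List Char)
    (hpre : pre.toList = q ++ ['_']) (hq2 : '_' ∉ q)
    (hq : pvPartitionU t.toList = (p, f, r)) (hne : f = false ∨ p ≠ q) :
    PySem.Str.startswith t pre = false := by
  by_contra h
  obtain ⟨r', hr'⟩ := pv_start_found t pre q hpre hq2
    (by revert h; cases PySem.Str.startswith t pre <;> simp)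
  rw [hq] at hr'
  simp only [Prod.mk.injEq] at hr'
  rcases hne with hf | hp
  · rw [hf] at hr'; exact absurd hr'.2.1 (by simp)
  · exact hp hr'.1

-- the two loop bodies agree on every dictionary and every tag
set_option maxHeartbeats 1600000 in
theorem pv_step_eq (out : PySem.Dict String String) (t : String) :
    pvStepA out t = pvStepB out t := by
  rcases hq : pvPartitionU t.toList with ⟨p, f, r⟩
  cases f with
  | false =>
    have hA1 := pv_not_start t "company_" "company".toList p false r (by decide) (by decide) hq (Or.inl rfl)
    have hA2 := pv_not_start t "order_" "order".toList p false r (by decide) (by decide) hq (Or.inl rfl)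
    have hA3 := pv_not_start t "customer_" "customer".toList p false r (by decide) (by decide) hq (Or.inl rfl)
    rw [show pvStepB out t = out from by simp [pvStepB, hq]]
    simp only [pvStepA, hA1, hA2, hA3, Bool.false_eq_true, if_false]
  | true =>
    obtain ⟨hdec, hnp⟩ := pvPartitionU_found _ _ _ hq
    have hB : pvStepB out t =
        match pvTable.get? (String.ofList p) with
        | some k => out.insert k (String.ofList r)
        | none => out := by
      simp [pvStepB, hq]
    by_cases hc1 : "company" = String.ofList p
    · have hp : p = "company".toList := by
        have := congrArg String.toList hc1; simpa using this.symm
      have hstart : PySem.Str.startswith t "company_" = true := by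
        rw [pv_startswith_iff]
        exact ⟨r, by rw [hdec, hp]; simp⟩
      rw [hB, pv_tbl_get, if_pos hc1]
      have hm : (match (some "companyId" : Option String) with
          | some k => out.insert k (String.ofList r)
          | none => out) = out.insert "companyId" (String.ofList r) := rfl
      rw [hm]
      simp only [pvStepA, hstart, if_true]
      have hs : (PySem.Str.slice t (some 8) none).toList = t.toList.drop 8 := by
        simp [PySem.Str.slice, PySem.List.slice_from _ (by norm_num : (0:Int) ≤ 8)]
      have harg : PySem.Str.slice t (some 8) none = String.ofList r := by
        apply String.toList_inj.mp
        rw [hs, hdec, hp]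
        simp
      rw [harg]
    · by_cases hc2 : "order" = String.ofList p
      · have hp : p = "order".toList := by
          have := congrArg String.toList hc2; simpa using this.symm
        have hstart : PySem.Str.startswith t "order_" = true := by
          rw [pv_startswith_iff]
          exact ⟨r, by rw [hdec, hp]; simp⟩
        have hno1 := pv_not_start t "company_" "company".toList p true r (by decide) (by decide) hq
          (Or.inr (by rw [hp]; decide))
        rw [hB, pv_tbl_get, if_neg hc1, if_pos hc2]
        have hm : (match (some "orderId" : Option String) with
            | some k => out.insert k (String.ofList r)
            | none => out) = out.insert "orderId" (String.ofList r) := rfl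
        rw [hm]
        simp only [pvStepA, hno1, Bool.false_eq_true, if_false, hstart, if_true]
        have hs : (PySem.Str.slice t (some 6) none).toList = t.toList.drop 6 := by
          simp [PySem.Str.slice, PySem.List.slice_from _ (by norm_num : (0:Int) ≤ 6)]
        have harg : PySem.Str.slice t (some 6) none = String.ofList r := by
          apply String.toList_inj.mp
          rw [hs, hdec, hp]
          simp
        rw [harg]
      · by_cases hc3 : "customer" = String.ofList p
        · have hp : p = "customer".toList := by
            have := congrArg String.toList hc3; simpa using this.symm
          have hstart : PySem.Str.startswith t "customer_" = true := by
            rw [pv_startswith_iff]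
            exact ⟨r, by rw [hdec, hp]; simp⟩
          have hno1 := pv_not_start t "company_" "company".toList p true r (by decide) (by decide) hq
            (Or.inr (by rw [hp]; decide))
          have hno2 := pv_not_start t "order_" "order".toList p true r (by decide) (by decide) hq
            (Or.inr (by rw [hp]; decide))
          rw [hB, pv_tbl_get, if_neg hc1, if_neg hc2, if_pos hc3]
          have hm : (match (some "customerId" : Option String) with
              | some k => out.insert k (String.ofList r)
              | none => out) = out.insert "customerId" (String.ofList r) := rfl
          rw [hm]
          simp only [pvStepA, hno1, hno2, Bool.false_eq_true, if_false, hstart, if_true]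
          have hs : (PySem.Str.slice t (some 9) none).toList = t.toList.drop 9 := by
            simp [PySem.Str.slice, PySem.List.slice_from _ (by norm_num : (0:Int) ≤ 9)]
          have harg : PySem.Str.slice t (some 9) none = String.ofList r := by
            apply String.toList_inj.mp
            rw [hs, hdec, hp]
            simp
          rw [harg]
        · have hno1 := pv_not_start t "company_" "company".toList p true r (by decide) (by decide) hq
            (Or.inr (fun hp => hc1 (by rw [hp]; decide)))
          have hno2 := pv_not_start t "order_" "order".toList p true r (by decide) (by decide) hq
            (Or.inr (fun hp => hc2 (by rw [hp]; decide)))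
          have hno3 := pv_not_start t "customer_" "customer".toList p true r (by decide) (by decide) hq
            (Or.inr (fun hp => hc3 (by rw [hp]; decide)))
          rw [hB, pv_tbl_get, if_neg hc1, if_neg hc2, if_neg hc3]
          simp only [pvStepA, hno1, hno2, hno3, Bool.false_eq_true, if_false]

-- ===== VERDICT (by name: the statement is the Claim_ definition above) =====
theorem parse_purchase_tags_spec : Claim_equal_parse_purchase_tags := by
  intro tags _
  unfold Spec_parse_purchase_tags parse_purchase_tags parse_purchase_tags_alt
  rw [show pvStepA = pvStepB from funext fun d => funext fun t => pv_step_eq d t]
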